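-- pv_equiv track=rewrite | github.com/AmosWongZhenLoong/FIT3080 | solvepuzzle.py | puzzleValidity
-- ===== SOURCE A (Python) =====
-- def puzzleValidity(string):
--     if len(string) < 3:
--         return False
--     eCount = 0
--     for i in range(len(string)):
--         if string[i] != 'B' and string[i] != 'E' and string[i] != 'W':
--             return False
--         if string[i] == 'E':
--             eCount += 1
--     if eCount > 1:
--         return False
--     if eCount == 0:
--         return False
--     return True
-- ===== SOURCE B (Python) =====
-- def puzzleValidity(string):
--     if len(string) < 3:
--         return False
--     parts = string.split('E')
--     if len(parts) != 2:
--         return False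
--     rest = parts[0] + parts[1]
--     return rest.replace('B', '').replace('W', '') == ''
-- ===== Notes on version B (the rewrite author's own statement) =====
-- stated objective: alternative
-- what changed: B validates by splitting the string on the letter E (exactly one E becomes: the split yields exactly two fragments) and then deleting the letters B and W from the concatenated fragments, accepting iff nothing remains, instead of A's indexed scan with early returns and a running counter.
import Mathlib
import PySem

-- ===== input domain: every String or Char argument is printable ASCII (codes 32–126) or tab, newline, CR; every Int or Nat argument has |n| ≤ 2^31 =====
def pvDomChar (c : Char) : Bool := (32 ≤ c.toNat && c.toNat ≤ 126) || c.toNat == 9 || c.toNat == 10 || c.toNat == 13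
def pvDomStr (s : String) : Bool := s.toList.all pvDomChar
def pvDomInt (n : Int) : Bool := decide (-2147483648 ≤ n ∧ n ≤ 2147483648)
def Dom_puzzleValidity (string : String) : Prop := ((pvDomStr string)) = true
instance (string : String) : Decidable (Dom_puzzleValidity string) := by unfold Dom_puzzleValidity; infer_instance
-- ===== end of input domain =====

-- B replaces A's indexed scan with a counter by a split-on-'E' (two fragments = one 'E') plus deletion of B/W; alternative algorithm, same values.

-- ===== PORT A =====
-- the 'for i in range(len(string))' loop with its early returns and eCount accumulator
def puzzleValidityLoop : List Char → Int → Option Int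
  | [], eCount => some eCount
  | c :: rest, eCount =>
    if c ≠ 'B' ∧ c ≠ 'E' ∧ c ≠ 'W' then none   -- 'return False'
    else puzzleValidityLoop rest (if c = 'E' then eCount + 1 else eCount)

def puzzleValidity (string : String) : Bool :=
  if PySem.Str.len string < 3 then false
  else
    match puzzleValidityLoop string.toList 0 with
    | none => false
    | some eCount =>
      if eCount > 1 then false
      else if eCount = 0 then false
      else true

-- ===== PORT B =====
def puzzleValidity_alt (string : String) : Bool :=
  if PySem.Str.len string < 3 then false
  else
    match PySem.Chars.splitOn string.toList ['E'] with   -- string.split('E')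
    | [p0, p1] =>                                        -- len(parts) == 2, parts[0], parts[1]
      PySem.Chars.replace (PySem.Chars.replace (p0 ++ p1) ['B'] []) ['W'] [] == []
    | _ => false                                         -- len(parts) != 2 → False

-- ===== PRECONDITION & SPEC =====
def Spec_puzzleValidity (string : String) (out : Bool) : Prop := out = puzzleValidity_alt string
instance (string : String) (out : Bool) : Decidable (Spec_puzzleValidity string out) := by unfold Spec_puzzleValidity; infer_instance

-- ===== CLAIM (what is proved, stated in full; the proofs are below) =====
def Claim_equal_puzzleValidity : Prop := ∀ (string : String), Dom_puzzleValidity string → Spec_puzzleValidity string (puzzleValidity string)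

-- ===== LEMMAS AND PROOFS =====

-- characterisation of A's loop: it returns some (e + #E) iff every char is in BEW
theorem puzzleValidityLoop_eq (l : List Char) (e : Int) :
    puzzleValidityLoop l e =
      if ∀ c ∈ l, c = 'B' ∨ c = 'E' ∨ c = 'W' then some (e + l.count 'E') else none := by
  induction l generalizing e with
  | nil => simp [puzzleValidityLoop]
  | cons c rest ih =>
    simp only [puzzleValidityLoop, ih, List.count_cons, List.mem_cons]
    by_cases hB : c = 'B' <;> by_cases hE : c = 'E' <;> by_cases hW : c = 'W' <;>
      simp_all <;> split_ifs <;> simp_all <;> push_cast <;> ring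

-- reference split: mySplit x pre l = the pieces of pre ++ l cut at each x (pre contains no x)
def mySplit (x : Char) (pre : List Char) : List Char → List (List Char)
  | [] => [pre]
  | c :: t => if c = x then pre :: mySplit x [] t else mySplit x (pre ++ [c]) t

theorem splitOnGo_eq (x : Char) (fuel : Nat) (l cur : List Char) (acc : List (List Char))
    (h : l.length ≤ fuel) :
    PySem.Chars.splitOn.go [x] fuel l cur acc = acc.reverse ++ mySplit x cur.reverse l := by
  induction fuel generalizing l cur acc with
  | zero =>
    have : l = [] := List.length_eq_zero_iff.mp (Nat.le_zero.mp h)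
    subst this
    simp [PySem.Chars.splitOn.go, mySplit]
  | succ n ih =>
    cases l with
    | nil => simp [PySem.Chars.splitOn.go, mySplit]
    | cons c t =>
      simp only [List.length_cons] at h
      by_cases hc : c = x
      · subst hc
        have hp : ([c].isPrefixOf (c :: t)) = true := by simp [List.isPrefixOf]
        simp only [PySem.Chars.splitOn.go, hp, if_pos]
        rw [ih _ _ _ (by simpa using Nat.le_of_succ_le_succ h)]
        simp [mySplit]
      · have hp : ([x].isPrefixOf (c :: t)) = false := by
          simp [List.isPrefixOf]; exact fun hh => hc hh.symm
        simp only [PySem.Chars.splitOn.go, hp, Bool.false_eq_true, if_false]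
        rw [ih _ _ _ (Nat.le_of_succ_le_succ h)]
        simp [mySplit, hc]

theorem splitOn_eq_mySplit (x : Char) (l : List Char) :
    PySem.Chars.splitOn l [x] = mySplit x [] l := by
  have := splitOnGo_eq x (l.length + 1) l [] [] (by omega)
  simpa [PySem.Chars.splitOn] using this

theorem mySplit_length (x : Char) (pre l : List Char) :
    (mySplit x pre l).length = l.count x + 1 := by
  induction l generalizing pre with
  | nil => simp [mySplit]
  | cons c t ih =>
    by_cases hc : c = x
    · subst hc; simp [mySplit, ih, List.count_cons]
    · simp [mySplit, hc, ih, List.count_cons, Ne.symm]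

theorem mySplit_flatten (x : Char) (pre l : List Char) :
    (mySplit x pre l).flatten = pre ++ l.filter (fun c => c ≠ x) := by
  induction l generalizing pre with
  | nil => simp [mySplit]
  | cons c t ih =>
    by_cases hc : c = x
    · subst hc; simp [mySplit, ih, List.filter_cons]
    · simp [mySplit, hc, ih, List.filter_cons]

-- replace with a one-char pattern and empty replacement is a filter
theorem replaceGo_eq (x : Char) (fuel : Nat) (l acc : List Char) (h : l.length ≤ fuel) :
    PySem.Chars.replace.go [x] [] fuel l acc = acc.reverse ++ l.filter (fun c => c ≠ x) := by
  induction fuel generalizing l acc with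
  | zero =>
    have : l = [] := List.length_eq_zero_iff.mp (Nat.le_zero.mp h)
    subst this
    simp [PySem.Chars.replace.go]
  | succ n ih =>
    cases l with
    | nil => simp [PySem.Chars.replace.go]
    | cons c t =>
      simp only [List.length_cons] at h
      by_cases hc : c = x
      · subst hc
        have hp : ([c].isPrefixOf (c :: t)) = true := by simp [List.isPrefixOf]
        simp only [PySem.Chars.replace.go, hp, if_pos]
        rw [ih _ _ (by simpa using Nat.le_of_succ_le_succ h)]
        simp [List.filter_cons]
      · have hp : ([x].isPrefixOf (c :: t)) = false := by
          simp [List.isPrefixOf]; exact fun hh => hc hh.symm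
        simp only [PySem.Chars.replace.go, hp, Bool.false_eq_true, if_false]
        rw [ih _ _ (Nat.le_of_succ_le_succ h)]
        simp [List.filter_cons, hc]

theorem replace_eq_filter (x : Char) (l : List Char) :
    PySem.Chars.replace l [x] [] = l.filter (fun c => c ≠ x) := by
  have := replaceGo_eq x l.length l [] le_rfl
  simpa [PySem.Chars.replace] using this

-- deleting 'B' then 'W' from the non-'E' chars leaves nothing iff every char is in BEW
theorem BW_nil_iff (L : List Char) :
    PySem.Chars.replace (PySem.Chars.replace (L.filter (fun c => decide (c ≠ 'E'))) ['B'] []) ['W'] [] = []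
      ↔ ∀ c ∈ L, c = 'B' ∨ c = 'E' ∨ c = 'W' := by
  simp only [replace_eq_filter, List.filter_filter, List.filter_eq_nil_iff]
  constructor <;> intro h c hc <;> have h2 := h c hc <;>
    by_cases hB : c = 'B' <;> by_cases hE : c = 'E' <;> by_cases hW : c = 'W' <;> simp_all

-- ===== VERDICT (by name: the statement is the Claim_ definition above) =====
theorem puzzleValidity_spec : Claim_equal_puzzleValidity := by
  intro s _
  show puzzleValidity s = puzzleValidity_alt s
  unfold puzzleValidity puzzleValidity_alt
  rw [puzzleValidityLoop_eq, splitOn_eq_mySplit]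
  by_cases hlen : PySem.Str.len s < 3
  · rw [if_pos hlen, if_pos hlen]
  · rw [if_neg hlen, if_neg hlen]
    by_cases hall : ∀ c ∈ s.toList, c = 'B' ∨ c = 'E' ∨ c = 'W'
    · rw [if_pos hall]
      show (if (0:Int) + ↑(s.toList.count 'E') > 1 then false
            else if (0:Int) + ↑(s.toList.count 'E') = 0 then false else true) = _
      by_cases h1 : s.toList.count 'E' = 1
      · -- exactly one 'E': the split has exactly two pieces and B accepts
        have hlen2 : (mySplit 'E' [] s.toList).length = 2 := by rw [mySplit_length, h1]
        obtain ⟨p0, p1, hp⟩ : ∃ p0 p1, mySplit 'E' [] s.toList = [p0, p1] := by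
          match hm : mySplit 'E' [] s.toList with
          | [p0, p1] => exact ⟨p0, p1, rfl⟩
          | [] | [_] | _ :: _ :: _ :: _ => rw [hm] at hlen2 <;> simp at hlen2
        have hflat : p0 ++ p1 = s.toList.filter (fun c => decide (c ≠ 'E')) := by
          have := mySplit_flatten 'E' [] s.toList
          rw [hp] at this; simpa using this
        rw [hp]
        show _ = (PySem.Chars.replace (PySem.Chars.replace (p0 ++ p1) ['B'] []) ['W'] [] == [])
        rw [hflat, h1]
        have hnil := (BW_nil_iff s.toList).mpr hall
        rw [hnil]
        norm_num
      · -- wrong number of 'E': A rejects via the counter, B via the piece count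
        have hne : (mySplit 'E' [] s.toList).length ≠ 2 := by rw [mySplit_length]; omega
        have hA : (if (0:Int) + ↑(s.toList.count 'E') > 1 then false
            else if (0:Int) + ↑(s.toList.count 'E') = 0 then false else true) = false := by
          split_ifs with hgt hz
          · rfl
          · rfl
          · exfalso; omega
        rw [hA]
        rcases hm : mySplit 'E' [] s.toList with _ | ⟨p, _ | ⟨q, _ | ⟨r, t⟩⟩⟩
        · rfl
        · rfl
        · exact absurd (by rw [hm]; rfl) hne
        · rfl
    · rw [if_neg hall]
      show false = _
      by_cases h1 : s.toList.count 'E' = 1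
      · have hlen2 : (mySplit 'E' [] s.toList).length = 2 := by rw [mySplit_length, h1]
        obtain ⟨p0, p1, hp⟩ : ∃ p0 p1, mySplit 'E' [] s.toList = [p0, p1] := by
          match hm : mySplit 'E' [] s.toList with
          | [p0, p1] => exact ⟨p0, p1, rfl⟩
          | [] | [_] | _ :: _ :: _ :: _ => rw [hm] at hlen2 <;> simp at hlen2
        have hflat : p0 ++ p1 = s.toList.filter (fun c => decide (c ≠ 'E')) := by
          have := mySplit_flatten 'E' [] s.toList
          rw [hp] at this; simpa using this
        rw [hp]
        show _ = (PySem.Chars.replace (PySem.Chars.replace (p0 ++ p1) ['B'] []) ['W'] [] == [])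
        rw [hflat]
        have hne : PySem.Chars.replace (PySem.Chars.replace
            (s.toList.filter (fun c => decide (c ≠ 'E'))) ['B'] []) ['W'] [] ≠ [] :=
          fun hnil => hall ((BW_nil_iff s.toList).mp hnil)
        exact (beq_eq_false_iff_ne.mpr hne).symm
      · have hne : (mySplit 'E' [] s.toList).length ≠ 2 := by rw [mySplit_length]; omega
        rcases hm : mySplit 'E' [] s.toList with _ | ⟨p, _ | ⟨q, _ | ⟨r, t⟩⟩⟩
        · rfl
        · rfl
        · exact absurd (by rw [hm]; rfl) hne
        · rfl
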